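-- pv_equiv track=rewrite | github.com/Solidium-X/Bioinformatics_Solutions | Proteins/convolutionCyclopeptideSequencing.py | linearPeptideSubs
-- ===== SOURCE A (Python) =====
-- def rotations(peptide):
--     # Obtain all circular rotations of peptide string.
--     rotates = [peptide[i:] + peptide[:i] for i in range(len(peptide))]
--     return rotates
--
-- def linearPeptideSubs(peptide):
--     # return all of the peptide substrings within a linear peptide string.
--     rotes = rotations(peptide)
--     combos = []
--     start = len(peptide)+1
--
--     for rote in rotes:
--         start -= 1
--         for i in range(start):
--             combos.append(rote[:i+1])
--
--     return combos
-- ===== SOURCE B (Python) =====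
-- def linearPeptideSubs(peptide):
--     # Peel suffixes: for each suffix of the peptide, emit its prefixes by
--     # incremental character accumulation (no rotations, no index ranges, no slicing
--     # of substrings).
--     combos = []
--     suffix = peptide
--     while suffix:
--         acc = ""
--         for ch in suffix:
--             acc += ch
--             combos.append(acc)
--         suffix = suffix[1:]
--     return combos
-- ===== Notes on version B (the rewrite author's own statement) =====
-- stated objective: simpler
-- what changed: Drops the rotations helper and countdown counter entirely: B peels suffixes of the peptide with a while loop and emits each suffix's prefixes by incremental character accumulation, so no rotation strings are materialized, no index ranges are used, and no substring is produced by slicing.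
import Mathlib
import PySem

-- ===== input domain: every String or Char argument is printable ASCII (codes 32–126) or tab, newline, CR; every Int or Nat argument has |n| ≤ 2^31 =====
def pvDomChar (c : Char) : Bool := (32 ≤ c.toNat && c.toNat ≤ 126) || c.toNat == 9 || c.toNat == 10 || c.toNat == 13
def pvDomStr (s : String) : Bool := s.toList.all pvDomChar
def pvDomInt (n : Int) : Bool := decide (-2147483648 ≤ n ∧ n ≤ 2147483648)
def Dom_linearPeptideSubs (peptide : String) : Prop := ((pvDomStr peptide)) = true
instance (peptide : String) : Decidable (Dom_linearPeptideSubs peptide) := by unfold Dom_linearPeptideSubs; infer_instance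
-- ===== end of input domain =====

-- B replaces A's rotation-based double loop by peeling suffixes and emitting each suffix's prefixes via char accumulation, with no rotations, index ranges or substring slicing (objective: simpler).


-- ===== PORT A =====
-- rotations: [peptide[i:] + peptide[:i] for i in range(len(peptide))]
def rotationsA (cs : List Char) : List (List Char) :=
  (PySem.List.pyRange 0 (cs.length : Int) 1).map
    (fun i => PySem.List.slice cs (some i) none ++ PySem.List.slice cs none (some i))

def linearPeptideSubs (peptide : String) : List String :=
  let cs := peptide.toList
  let rotes := rotationsA cs
  -- combos = []; start = len(peptide)+1; for rote in rotes: start -= 1; for i in range(start): combos.append(rote[:i+1])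
  let st := rotes.foldl
    (fun (st : Int × List (List Char)) rote =>
      let start := st.1 - 1
      (start, st.2 ++ (PySem.List.pyRange 0 start 1).map
        (fun i => PySem.List.slice rote none (some (i + 1)))))
    ((cs.length : Int) + 1, [])
  st.2.map (fun l => String.ofList l)

-- ===== PORT B =====
-- while suffix: acc = ""; for ch in suffix: acc += ch; combos.append(acc); suffix = suffix[1:]
-- (suffix[1:] on a nonempty string is exactly its tail, hence the structural recursion on `rest`)
def altLoop : List Char → List (List Char) → List (List Char)
  | [], combos => combos
  | c :: rest, combos =>
      altLoop rest
        ((c :: rest).foldl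
          (fun (st : List Char × List (List Char)) ch =>
            let acc := st.1 ++ [ch]
            (acc, st.2 ++ [acc]))
          ([], combos)).2

def linearPeptideSubs_alt (peptide : String) : List String :=
  (altLoop peptide.toList []).map (fun l => String.ofList l)

-- ===== PRECONDITION & SPEC =====
def Spec_linearPeptideSubs (peptide : String) (out : List String) : Prop := out = linearPeptideSubs_alt peptide
instance (peptide : String) (out : List String) : Decidable (Spec_linearPeptideSubs peptide out) := by unfold Spec_linearPeptideSubs; infer_instance

-- ===== CLAIM (what is proved, stated in full; the proofs are below) =====
def Claim_equal_linearPeptideSubs : Prop := ∀ (peptide : String), Dom_linearPeptideSubs peptide → Spec_linearPeptideSubs peptide (linearPeptideSubs peptide)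

-- ===== LEMMAS AND PROOFS =====

-- rotation by k, on the char-list side
def rotN (cs : List Char) (k : Nat) : List Char := cs.drop k ++ cs.take k

-- canonical form of the output: substrings grouped by start index, shortest first
def canon (cs : List Char) : List (List Char) :=
  ((List.range cs.length).map
    (fun k => (List.range (cs.length - k)).map (fun i => (cs.drop k).take (i + 1)))).flatten

lemma rotationsA_eq (cs : List Char) :
    rotationsA cs = (List.range cs.length).map (rotN cs) := by
  unfold rotationsA
  rw [PySem.List.pyRange_one]
  simp only [List.map_map, Int.sub_zero, Int.toNat_natCast]
  apply List.map_congr_left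
  intro k _
  simp only [Function.comp_apply, zero_add]
  rw [PySem.List.slice_from cs (Int.natCast_nonneg _),
      PySem.List.slice_to cs (Int.natCast_nonneg _)]
  simp [rotN]

lemma A_inner (rote : List Char) (m : Nat) :
    (PySem.List.pyRange 0 (m : Int) 1).map
        (fun i => PySem.List.slice rote none (some (i + 1)))
      = (List.range m).map (fun i => rote.take (i + 1)) := by
  rw [PySem.List.pyRange_one]
  simp only [List.map_map, Int.sub_zero, Int.toNat_natCast]
  apply List.map_congr_left
  intro k _
  simp only [Function.comp_apply, zero_add]
  have h1 : ((k : Int) + 1) = ((k + 1 : Nat) : Int) := by omega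
  rw [h1, PySem.List.slice_to rote (Int.natCast_nonneg _)]
  simp

lemma A_fold (rotes : List (List Char)) (s : Int) (acc : List (List Char)) :
    (rotes.foldl
      (fun (st : Int × List (List Char)) rote =>
        ((st.1 - 1 : Int), st.2 ++ (PySem.List.pyRange 0 (st.1 - 1) 1).map
          (fun i => PySem.List.slice rote none (some (i + 1)))))
      (s, acc)).2
    = acc ++ (rotes.foldr
        (fun rote (p : Int × List (List Char)) =>
          ((p.1 + 1 : Int),
            (PySem.List.pyRange 0 p.1 1).map
              (fun i => PySem.List.slice rote none (some (i + 1))) ++ p.2))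
        (s - rotes.length, [])
        |>.2) := by
  induction rotes generalizing s acc with
  | nil => simp
  | cons r rs ih =>
    simp only [List.foldl_cons, List.foldr_cons]
    rw [ih]
    have hfst : ∀ (l : List (List Char)) (t : Int),
        (l.foldr (fun rote (p : Int × List (List Char)) =>
          ((p.1 + 1 : Int),
            (PySem.List.pyRange 0 p.1 1).map
              (fun i => PySem.List.slice rote none (some (i + 1))) ++ p.2)) (t, [])).1
          = t + l.length := by
      intro l t
      induction l with
      | nil => simp
      | cons x xs ihx => simp [ihx]; omega
    have hb : (s - ((r :: rs).length : Int)) = (s - 1) - (rs.length : Int) := by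
      simp; omega
    rw [hb, List.append_assoc]
    congr 2
    rw [hfst rs ((s - 1) - (rs.length : Int))]
    congr 1
    ring_nf

-- the right-fold of A's loop over the first m rotations, with explicit counters
lemma foldr_rots (cs : List Char) (m : Nat) :
    ∀ (t : Int) (acc : List (List Char)),
      (((List.range m).map (rotN cs)).foldr
        (fun rote (p : Int × List (List Char)) =>
          ((p.1 + 1 : Int),
            (PySem.List.pyRange 0 p.1 1).map
              (fun i => PySem.List.slice rote none (some (i + 1))) ++ p.2))
        (t, acc)).2
      = ((List.range m).map
          (fun k => (PySem.List.pyRange 0 (t + ((m - 1 - k : Nat) : Int)) 1).map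
            (fun i => PySem.List.slice (rotN cs k) none (some (i + 1))))).flatten ++ acc := by
  induction m with
  | zero => simp
  | succ m ih =>
    intro t acc
    rw [List.range_succ, List.map_append, List.foldr_append]
    simp only [List.map_cons, List.map_nil, List.foldr_cons, List.foldr_nil]
    rw [ih (t + 1)]
    rw [List.map_append, List.flatten_append]
    simp only [List.map_cons, List.map_nil, List.flatten_cons, List.flatten_nil,
      List.append_nil, List.append_assoc]
    congr 1
    · apply congrArg
      apply List.map_congr_left
      intro k hk
      have hk' : k < m := List.mem_range.mp hk
      have : t + 1 + ((m - 1 - k : Nat) : Int) = t + ((m + 1 - 1 - k : Nat) : Int) := by omega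
      rw [this]
    · have : t + ((m + 1 - 1 - m : Nat) : Int) = t := by omega
      rw [this]

-- take of a rotation agrees with take of the suffix, for lengths within the suffix
lemma take_rot (cs : List Char) (k m : Nat) (h : m ≤ cs.length - k) :
    (rotN cs k).take m = (cs.drop k).take m := by
  unfold rotN
  rw [List.take_append_of_le_length]
  simpa using h

lemma A_canon (cs : List Char) : linearPeptideSubs (String.ofList cs) = (canon cs).map String.ofList := by
  unfold linearPeptideSubs
  simp only [String.toList_ofList]
  rw [A_fold, rotationsA_eq]
  have hlen : ((List.range cs.length).map (rotN cs)).length = cs.length := by simp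
  rw [hlen]
  have hbase : ((cs.length : Int) + 1) - (cs.length : Int) = 1 := by omega
  rw [hbase, foldr_rots]
  rw [List.nil_append, List.append_nil]
  unfold canon
  apply congrArg
  apply congrArg
  apply List.map_congr_left
  intro k hk
  have hk' : k < cs.length := List.mem_range.mp hk
  have h1 : (1 : Int) + ((cs.length - 1 - k : Nat) : Int) = ((cs.length - k : Nat) : Int) := by omega
  rw [h1, A_inner]
  apply List.map_congr_left
  intro i hi
  have hi' : i < cs.length - k := List.mem_range.mp hi
  rw [take_rot cs k (i + 1) (by omega)]

-- the inner accumulator loop of B appends exactly the prefixes, shortest first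
lemma altPrefs_fold (cs : List Char) :
    ∀ (p : List Char) (out : List (List Char)),
      (cs.foldl
        (fun (st : List Char × List (List Char)) ch =>
          let acc := st.1 ++ [ch]
          (acc, st.2 ++ [acc]))
        (p, out)).2
      = out ++ (List.range cs.length).map (fun i => p ++ cs.take (i + 1)) := by
  induction cs with
  | nil => simp
  | cons c rest ih =>
    intro p out
    simp only [List.foldl_cons]
    rw [ih]
    rw [List.length_cons, List.range_succ_eq_map, List.map_cons, List.map_map]
    simp only [List.take_succ_cons, List.take_zero, List.append_assoc, List.singleton_append]
    congr 2

lemma altLoop_canon (cs : List Char) :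
    ∀ combos, altLoop cs combos = combos ++ canon cs := by
  induction cs with
  | nil => intro combos; simp [altLoop, canon]
  | cons c rest ih =>
    intro combos
    rw [altLoop, altPrefs_fold, ih, List.append_assoc]
    congr 1
    conv_rhs => rw [canon, List.length_cons, List.range_succ_eq_map, List.map_cons,
      List.flatten_cons]
    congr 1
    unfold canon
    apply congrArg
    rw [List.map_map]
    apply List.map_congr_left
    intro k _
    simp only [Function.comp_apply, List.drop_succ_cons]
    have h : rest.length + 1 - (k + 1) = rest.length - k := by omega
    rw [h]

lemma B_canon (cs : List Char) :
    linearPeptideSubs_alt (String.ofList cs) = (canon cs).map String.ofList := by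
  unfold linearPeptideSubs_alt
  simp only [String.toList_ofList]
  rw [altLoop_canon]
  simp

-- ===== VERDICT (by name: the statement is the Claim_ definition above) =====
theorem linearPeptideSubs_spec : Claim_equal_linearPeptideSubs := by
  intro peptide _hd
  unfold Spec_linearPeptideSubs
  have h : peptide = String.ofList peptide.toList := by simp
  rw [h, A_canon, B_canon]
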